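-- pv_equiv track=rewrite | github.com/nvallejor/python_scripts | 13.py | sum_mutl_digts_de_a
-- ===== SOURCE A (Python) =====
-- def es_mult_dig(num, dig):
--     num=abs(num)
--     return (num%dig==0)
--
-- def sum_mutl_digts_de_a(de, a, dig1, dig2):
--     suma=0
--     for i in range (0, ((a-de)+1)):
--     #Se hacen los ciclos necesarios para garantizar que evalua todos lo números
--     #entre los dos números ingresados, incluyendo el límite superior.
--         if es_mult_dig((de+i), dig1):
--             suma+=(de+i)
--             continue
--             #Sí el número es múltiplo del 3, se agraga a suma, si
--             #fuera también múltiplo del 5 (ejemplo 120) no hay necesidad de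
--             #volver a agregarlo a la suma.
--         if es_mult_dig((de+i), dig2):
--             suma+=(de+i)
--     return(suma)
-- ===== SOURCE B (Python) =====
-- def _gcd(x, y):
--     while y:
--         x, y = y, x % y
--     return x
--
-- def _msum(d, lo, hi):
--     # sum of the multiples of |d| lying in [lo, hi], in closed form
--     if d < 0:
--         d = -d
--     k1 = -((-lo) // d)      # ceil(lo / d)
--     k2 = hi // d            # floor(hi / d)
--     n = k2 - k1 + 1
--     if n <= 0:
--         return 0
--     return d * (k1 + k2) * n // 2
--
-- def sum_mutl_digts_de_a(de, a, dig1, dig2):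
--     p = abs(dig1)
--     q = abs(dig2)
--     l = p // _gcd(p, q) * q
--     return _msum(dig1, de, a) + _msum(dig2, de, a) - _msum(l, de, a)
-- ===== Notes on version B (the rewrite author's own statement) =====
-- stated objective: faster
-- what changed: Replaces the element-by-element scan of [de,a] with three O(1) arithmetic-series sums (multiples of |dig1|, of |dig2|, minus multiples of their lcm) by inclusion-exclusion.
-- outside the precondition, e.g. on sum_mutl_digts_de_a(5, 3, 0, 7): A returns 0, B raises ZeroDivisionError; on sum_mutl_digts_de_a(2, 2, 2, 0): A returns 2, B raises ZeroDivisionError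
import Mathlib
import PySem

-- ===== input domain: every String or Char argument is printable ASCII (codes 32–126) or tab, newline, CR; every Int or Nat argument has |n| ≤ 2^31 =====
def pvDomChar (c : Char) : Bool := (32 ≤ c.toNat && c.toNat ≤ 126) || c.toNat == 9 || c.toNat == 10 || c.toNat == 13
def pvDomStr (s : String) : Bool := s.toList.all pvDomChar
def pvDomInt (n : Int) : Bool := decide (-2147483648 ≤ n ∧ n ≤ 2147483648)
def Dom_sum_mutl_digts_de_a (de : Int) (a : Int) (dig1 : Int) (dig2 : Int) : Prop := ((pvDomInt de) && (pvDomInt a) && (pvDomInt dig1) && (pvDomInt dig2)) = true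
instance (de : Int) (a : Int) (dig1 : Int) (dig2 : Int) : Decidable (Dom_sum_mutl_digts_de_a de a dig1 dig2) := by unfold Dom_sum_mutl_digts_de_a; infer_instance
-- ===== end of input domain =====

-- B replaces A's element-by-element scan of [de, a] with three closed-form arithmetic-series
-- sums (multiples of |dig1|, of |dig2|, minus multiples of their lcm) by inclusion-exclusion
-- (objective: faster; equality of return values is proved on Pre_, i.e. for nonzero digits).

-- ===== PORT A =====
def es_mult_dig (num : Int) (dig : Int) : Bool :=
  PySem.Int.mod |num| dig == 0

def sum_mutl_digts_de_a (de : Int) (a : Int) (dig1 : Int) (dig2 : Int) : Int :=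
  (PySem.List.pyRange 0 ((a - de) + 1) 1).foldl
    (fun suma i =>
      if es_mult_dig (de + i) dig1 then suma + (de + i)
      else if es_mult_dig (de + i) dig2 then suma + (de + i)
      else suma) 0

-- ===== PORT B =====
-- termination helper for the Euclid loop (named so the port can cite it)
theorem pvModAbsLt (x y : Int) (hy : ¬ y = 0) : (PySem.Int.mod x y).natAbs < y.natAbs := by
  rcases lt_or_gt_of_ne hy with h | h
  · have hb := PySem.Int.mod_neg_bounds (a := x) h
    omega
  · have h1 := PySem.Int.mod_nonneg (a := x) h
    have h2 := PySem.Int.mod_lt (a := x) h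
    omega

def pvGcd (x : Int) (y : Int) : Int :=
  if _h : y = 0 then x else pvGcd y (PySem.Int.mod x y)
termination_by y.natAbs
decreasing_by exact pvModAbsLt x y _h

def pvMsum (d : Int) (lo : Int) (hi : Int) : Int :=
  let d' := if d < 0 then -d else d
  let k1 := -(PySem.Int.floordiv (-lo) d')
  let k2 := PySem.Int.floordiv hi d'
  let n := k2 - k1 + 1
  if n ≤ 0 then 0 else PySem.Int.floordiv (d' * (k1 + k2) * n) 2

def sum_mutl_digts_de_a_alt (de : Int) (a : Int) (dig1 : Int) (dig2 : Int) : Int :=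
  let p := |dig1|
  let q := |dig2|
  let l := PySem.Int.floordiv p (pvGcd p q) * q
  pvMsum dig1 de a + pvMsum dig2 de a - pvMsum l de a

-- ===== PRECONDITION & SPEC =====
-- Pre_ excludes dig1 = 0 or dig2 = 0: there A raises ZeroDivisionError except on degenerate
-- inputs (empty range, or every number a multiple of the other digit) where the zero divisor
-- is never reached and A returns; B's closed form always divides by both digits and raises.
def Pre_sum_mutl_digts_de_a (de : Int) (a : Int) (dig1 : Int) (dig2 : Int) : Prop :=
  dig1 ≠ 0 ∧ dig2 ≠ 0
instance (de : Int) (a : Int) (dig1 : Int) (dig2 : Int) : Decidable (Pre_sum_mutl_digts_de_a de a dig1 dig2) := by unfold Pre_sum_mutl_digts_de_a; infer_instance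

def pvWitness_sum_mutl_digts_de_a : Int × Int × Int × Int := (1, 10, 3, 5)

def Spec_sum_mutl_digts_de_a (de : Int) (a : Int) (dig1 : Int) (dig2 : Int) (out : Int) : Prop := out = sum_mutl_digts_de_a_alt de a dig1 dig2
instance (de : Int) (a : Int) (dig1 : Int) (dig2 : Int) (out : Int) : Decidable (Spec_sum_mutl_digts_de_a de a dig1 dig2 out) := by unfold Spec_sum_mutl_digts_de_a; infer_instance

-- ===== CLAIM (what is proved, stated in full; the proofs are below) =====
def Claim_equal_sum_mutl_digts_de_a : Prop := ∀ (de : Int) (a : Int) (dig1 : Int) (dig2 : Int), Dom_sum_mutl_digts_de_a de a dig1 dig2 → Pre_sum_mutl_digts_de_a de a dig1 dig2 → Spec_sum_mutl_digts_de_a de a dig1 dig2 (sum_mutl_digts_de_a de a dig1 dig2)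

-- ===== LEMMAS AND PROOFS =====

theorem es_true_iff (x d : Int) : es_mult_dig x d = true ↔ d ∣ x := by
  simp [es_mult_dig, PySem.Int.mod_eq_zero_iff_dvd, dvd_abs]

theorem pvAbsIte (d : Int) : (if d < 0 then -d else d) = |d| := by
  split <;> [exact (abs_of_neg ‹_›).symm; exact (abs_of_nonneg (by omega)).symm]

theorem fdiv_two_mul (t : Int) : PySem.Int.floordiv (2 * t) 2 = t := by
  rw [PySem.Int.floordiv_eq_iff_of_pos (by norm_num)]
  constructor <;> linarith

theorem even_mul_shift (a b : Int) : ∃ t, (a + b) * (b - a + 1) = 2 * t := by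
  rcases Int.even_or_odd (a + b) with ⟨c, hc⟩ | ⟨c, hc⟩
  · exact ⟨c * (b - a + 1), by rw [hc]; ring⟩
  · have h2 : b - a + 1 = 2 * (b - c) := by omega
    exact ⟨(2 * c + 1) * (b - c), by rw [hc, h2]; ring⟩

theorem msum_zero (d lo hi : Int) (hd : d ≠ 0) (h : hi < lo) : pvMsum d lo hi = 0 := by
  simp only [pvMsum, pvAbsIte]
  have hD0 : 0 < |d| := abs_pos.mpr hd
  set D := |d| with hDdef
  set K1 := -(PySem.Int.floordiv (-lo) D) with hK1def
  set k2 := PySem.Int.floordiv hi D with hk2def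
  obtain ⟨hK1a, hK1b⟩ := (PySem.Int.neg_floordiv_neg_eq_iff_of_pos hD0).mp hK1def.symm
  obtain ⟨hk2a, hk2b⟩ := (PySem.Int.floordiv_eq_iff_of_pos hD0).mp hk2def.symm
  have hng : k2 - K1 + 1 ≤ 0 := by
    by_contra hcon
    have hle : K1 ≤ k2 := by omega
    have : K1 * D ≤ k2 * D := mul_le_mul_of_nonneg_right hle hD0.le
    linarith
  rw [if_pos hng]

theorem msum_step (d lo hi : Int) (hd : d ≠ 0) (h : lo ≤ hi) :
    pvMsum d lo hi = pvMsum d lo (hi - 1) + (if d ∣ hi then hi else 0) := by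
  simp only [pvMsum, pvAbsIte]
  have hD0 : 0 < |d| := abs_pos.mpr hd
  set D := |d| with hDdef
  set K1 := -(PySem.Int.floordiv (-lo) D) with hK1def
  set k2 := PySem.Int.floordiv hi D with hk2def
  set k2' := PySem.Int.floordiv (hi - 1) D with hk2'def
  obtain ⟨hK1a, hK1b⟩ := (PySem.Int.neg_floordiv_neg_eq_iff_of_pos hD0).mp hK1def.symm
  obtain ⟨hk2a, hk2b⟩ := (PySem.Int.floordiv_eq_iff_of_pos hD0).mp hk2def.symm
  by_cases hdvd : d ∣ hi
  · have hDd : D ∣ hi := (abs_dvd d hi).mpr hdvd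
    obtain ⟨m, hm⟩ := hDd
    have hk2m : k2 = m := by
      rw [hk2def]
      rw [PySem.Int.floordiv_eq_iff_of_pos hD0]
      constructor <;> nlinarith
    have hk2'm : k2' = m - 1 := by
      rw [hk2'def]
      rw [PySem.Int.floordiv_eq_iff_of_pos hD0]
      constructor <;> nlinarith
    have hK1m : K1 ≤ m := by nlinarith
    rw [hk2m, hk2'm, if_pos hdvd]
    rw [if_neg (by omega)]
    by_cases hK1eq : K1 = m
    · rw [if_pos (by omega)]
      have e1 : D * (K1 + m) * (m - K1 + 1) = 2 * (D * m) := by rw [hK1eq]; ring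
      rw [e1, fdiv_two_mul]
      omega
    · rw [if_neg (by omega)]
      obtain ⟨t, ht⟩ := even_mul_shift K1 m
      obtain ⟨t', ht'⟩ := even_mul_shift K1 (m - 1)
      have e1 : D * (K1 + m) * (m - K1 + 1) = 2 * (D * t) := by
        rw [mul_assoc, ht]; ring
      have e2 : D * (K1 + (m - 1)) * (m - 1 - K1 + 1) = 2 * (D * t') := by
        rw [mul_assoc, ht']; ring
      rw [e1, e2, fdiv_two_mul, fdiv_two_mul]
      have hid : (K1 + m) * (m - K1 + 1) = (K1 + (m - 1)) * (m - 1 - K1 + 1) + 2 * m := by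
        ring
      have htt : t = t' + m := by linarith
      rw [htt, hm]; ring
  · have hDd : ¬ D ∣ hi := fun hc => hdvd ((abs_dvd d hi).mp hc)
    have hne : k2 * D ≠ hi := fun heq => hDd ⟨k2, by linarith⟩
    have hk2'eq : k2' = k2 := by
      rw [hk2'def]
      rw [PySem.Int.floordiv_eq_iff_of_pos hD0]
      constructor <;> [omega; linarith]
    rw [hk2'eq, if_neg hdvd]
    ring

theorem loop_eq (d1 d2 l : Int) (h1 : d1 ≠ 0) (h2 : d2 ≠ 0) (hl : l ≠ 0)
    (hiff : ∀ x : Int, l ∣ x ↔ d1 ∣ x ∧ d2 ∣ x) (de : Int) (n : Nat) :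
    (PySem.List.pyRange 0 (n : Int) 1).foldl
      (fun suma i =>
        if es_mult_dig (de + i) d1 then suma + (de + i)
        else if es_mult_dig (de + i) d2 then suma + (de + i)
        else suma) 0
    = pvMsum d1 de (de + n - 1) + pvMsum d2 de (de + n - 1) - pvMsum l de (de + n - 1) := by
  induction n with
  | zero =>
    rw [PySem.List.pyRange_one_eq_nil (by norm_num)]
    simp only [List.foldl_nil, Nat.cast_zero]
    rw [msum_zero d1 de (de + 0 - 1) h1 (by omega),
        msum_zero d2 de (de + 0 - 1) h2 (by omega),
        msum_zero l de (de + 0 - 1) hl (by omega)]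
    ring
  | succ n ih =>
    have hcast : ((n + 1 : Nat) : Int) = (n : Int) + 1 := by push_cast; ring
    rw [hcast, PySem.List.pyRange_one_succ_right (by positivity), List.foldl_append, ih]
    simp only [List.foldl_cons, List.foldl_nil]
    have hx : de + ((n : Int) + 1) - 1 = de + (n : Int) := by ring
    rw [hx]
    have hle : de ≤ de + (n : Int) := by
      have : (0 : Int) ≤ (n : Int) := Int.natCast_nonneg n
      omega
    rw [msum_step d1 de (de + (n : Int)) h1 hle,
        msum_step d2 de (de + (n : Int)) h2 hle,
        msum_step l de (de + (n : Int)) hl hle]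
    simp only [es_true_iff]
    by_cases ha : d1 ∣ de + (n : Int) <;> by_cases hb : d2 ∣ de + (n : Int) <;>
      simp [ha, hb, hiff] <;> ring

theorem pvGcd_gcd (x y : Int) : 0 ≤ x → 0 ≤ y → pvGcd x y = (Int.gcd x y : Int) := by
  induction x, y using pvGcd.induct with
  | case1 x =>
    intro hx _
    rw [pvGcd]
    simp [Int.natAbs_of_nonneg hx]
  | case2 x y h ih =>
    intro hx hy
    have hy' : 0 < y := lt_of_le_of_ne hy (Ne.symm h)
    rw [pvGcd, dif_neg h]
    rw [ih hy (PySem.Int.mod_nonneg x hy')]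
    rw [PySem.Int.mod_eq_emod_of_pos hy']
    congr 1
    have hmod : x % y = x + (-(x / y)) * y := by rw [Int.emod_def]; ring
    rw [hmod, Int.gcd_add_mul_right_right, Int.gcd_comm]

-- ===== VERDICT (by name: the statement is the Claim_ definition above) =====
theorem sum_mutl_digts_de_a_spec : Claim_equal_sum_mutl_digts_de_a := by
  intro de a d1 d2 _ hpre
  obtain ⟨h1, h2⟩ := hpre
  unfold Spec_sum_mutl_digts_de_a sum_mutl_digts_de_a sum_mutl_digts_de_a_alt
  have hp : (0 : Int) ≤ |d1| := abs_nonneg d1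
  have hq : (0 : Int) ≤ |d2| := abs_nonneg d2
  have hp0 : |d1| ≠ 0 := abs_ne_zero.mpr h1
  have hq0 : |d2| ≠ 0 := abs_ne_zero.mpr h2
  set G : Int := (Int.gcd |d1| |d2| : Int) with hGdef
  have hGpos : 0 < G := by
    rw [hGdef]
    exact_mod_cast Int.gcd_pos_iff.mpr (Or.inl hp0)
  have hGp : G ∣ |d1| := Int.gcd_dvd_left _ _
  have hGq : G ∣ |d2| := Int.gcd_dvd_right _ _
  obtain ⟨c, hc⟩ := hGp
  have hgrw : pvGcd |d1| |d2| = G := pvGcd_gcd _ _ hp hq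
  have hfdiv : PySem.Int.floordiv |d1| (pvGcd |d1| |d2|) = c := by
    rw [hgrw, PySem.Int.floordiv_eq_ediv_of_pos hGpos, hc,
        Int.mul_ediv_cancel_left c (ne_of_gt hGpos)]
  show _ = pvMsum d1 de a + pvMsum d2 de a
      - pvMsum (PySem.Int.floordiv |d1| (pvGcd |d1| |d2|) * |d2|) de a
  rw [hfdiv]
  set L : Int := c * |d2| with hLdef
  have hc0 : c ≠ 0 := by
    intro hcz
    exact hp0 (by rw [hc, hcz, mul_zero])
  have hL0 : L ≠ 0 := mul_ne_zero hc0 hq0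
  have hiff : ∀ x : Int, L ∣ x ↔ d1 ∣ x ∧ d2 ∣ x := by
    intro x
    constructor
    · intro hx
      obtain ⟨e, he⟩ := hGq
      have hpL : |d1| ∣ L := ⟨e, by rw [hLdef, hc, he]; ring⟩
      have hqL : |d2| ∣ L := ⟨c, by rw [hLdef]; ring⟩
      exact ⟨(abs_dvd d1 x).mp (dvd_trans hpL hx), (abs_dvd d2 x).mp (dvd_trans hqL hx)⟩
    · rintro ⟨hax, hbx⟩
      obtain ⟨s, hs⟩ := (abs_dvd d1 x).mpr hax
      obtain ⟨t, ht⟩ := (abs_dvd d2 x).mpr hbx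
      have hbez := Int.gcd_eq_gcd_ab |d1| |d2|
      refine ⟨t * Int.gcdA |d1| |d2| + s * Int.gcdB |d1| |d2|, ?_⟩
      apply mul_left_cancel₀ (ne_of_gt hGpos)
      calc G * x = x * ((Int.gcd |d1| |d2| : Int)) := by rw [hGdef]; ring
        _ = x * (|d1| * Int.gcdA |d1| |d2| + |d2| * Int.gcdB |d1| |d2|) := by rw [← hbez]
        _ = (|d2| * t) * (|d1| * Int.gcdA |d1| |d2|)
              + (|d1| * s) * (|d2| * Int.gcdB |d1| |d2|) := by rw [← hs, ← ht]; ring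
        _ = (G * c) * |d2| * (t * Int.gcdA |d1| |d2| + s * Int.gcdB |d1| |d2|) := by
              rw [← hc]; ring
        _ = G * (L * (t * Int.gcdA |d1| |d2| + s * Int.gcdB |d1| |d2|)) := by
              rw [hLdef]; ring
  by_cases hcase : a < de
  · rw [PySem.List.pyRange_one_eq_nil (by omega)]
    simp only [List.foldl_nil]
    rw [msum_zero d1 de a h1 hcase, msum_zero d2 de a h2 hcase,
        msum_zero L de a hL0 hcase]
    ring
  · push_neg at hcase
    set n : Nat := (a - de + 1).toNat with hndef
    have hn : (n : Int) = (a - de) + 1 := by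
      rw [hndef]
      omega
    rw [← hn, loop_eq d1 d2 L h1 h2 hL0 hiff de n]
    have hde : de + (n : Int) - 1 = a := by omega
    rw [hde]
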